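-- pv_equiv track=rewrite | github.com/madhav06/Coding-Interviews | Even_Occurances.py | even_occuring_element
-- ===== SOURCE A (Python) =====
-- def even_occuring_element(arr):
-- 	""" Returns the even occuring element within the list of integers """
--
-- 	dict = {}
-- 	for num in arr:
--
-- 		if num in dict:
-- 			dict[num] += 1
-- 		else:
-- 			dict[num] = 1
--
--
-- 	for num in dict:
--
-- 		if not dict[num] & 1:   # bitwise check for parity
-- 			return num
-- ===== SOURCE B (Python) =====
-- def even_occuring_element(arr):
--     """ Returns the even occuring element within the list of integers """
--     # Parity-toggle: after one pass, `odd` holds exactly the elements seen an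
--     # odd number of times (no counts are ever computed). Then the first element
--     # of arr absent from `odd` is the first even-occurring element.
--     odd = set()
--     for num in arr:
--         if num in odd:
--             odd.discard(num)
--         else:
--             odd.add(num)
--     for num in arr:
--         if num not in odd:
--             return num
-- ===== Notes on version B (the rewrite author's own statement) =====
-- stated objective: alternative
-- what changed: B never counts: one pass toggles each element in/out of a parity set (membership = seen an odd number of times so far), then returns the first element of arr not in the set; A instead builds a full frequency dict and scans its keys testing each count's low bit.
import Mathlib
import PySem

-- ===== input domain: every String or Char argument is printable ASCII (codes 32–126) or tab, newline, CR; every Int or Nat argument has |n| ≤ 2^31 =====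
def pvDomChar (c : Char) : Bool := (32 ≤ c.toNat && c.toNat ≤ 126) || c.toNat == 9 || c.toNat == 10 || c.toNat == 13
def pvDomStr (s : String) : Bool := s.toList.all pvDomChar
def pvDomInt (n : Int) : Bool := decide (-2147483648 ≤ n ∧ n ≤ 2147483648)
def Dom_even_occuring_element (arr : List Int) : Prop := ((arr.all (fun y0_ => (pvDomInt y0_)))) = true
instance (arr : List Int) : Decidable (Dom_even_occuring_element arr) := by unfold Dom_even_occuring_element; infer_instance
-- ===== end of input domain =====

-- B replaces A's frequency dict (count everything, then scan the keys testing each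
-- count's low bit) with a countless parity-toggle set plus a direct rescan of arr.

-- ===== PORT A =====
def even_occuring_element (arr : List Int) : Option Int :=
  let d := arr.foldl (fun d num =>
    if d.contains num then d.insert num (d.getD num 0 + 1)
    else d.insert num 1) PySem.Dict.empty
  d.keys.find? (fun num => PySem.Int.band (d.getD num 0) 1 == 0)

-- ===== PORT B =====
def even_occuring_element_alt (arr : List Int) : Option Int :=
  let odd := arr.foldl (fun s num =>
    if PySem.Set.contains s num then PySem.Set.discard s num
    else PySem.Set.add s num) PySem.Set.empty
  arr.find? (fun num => !(PySem.Set.contains odd num))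

-- ===== PRECONDITION & SPEC =====
def Spec_even_occuring_element (arr : List Int) (out : Option Int) : Prop := out = even_occuring_element_alt arr
instance (arr : List Int) (out : Option Int) : Decidable (Spec_even_occuring_element arr out) := by unfold Spec_even_occuring_element; infer_instance

-- ===== CLAIM (what is proved, stated in full; the proofs are below) =====
def Claim_equal_even_occuring_element : Prop := ∀ (arr : List Int), Dom_even_occuring_element arr → Spec_even_occuring_element arr (even_occuring_element arr)

-- ===== LEMMAS AND PROOFS =====

-- A's counting loop builds exactly Counter(arr).
lemma dict_eq_counter (arr : List Int) :
    arr.foldl (fun d num =>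
      if d.contains num then d.insert num (d.getD num 0 + 1)
      else d.insert num 1) PySem.Dict.empty = PySem.Dict.counter arr := by
  rw [PySem.List.foldl_congr_mem arr _ (fun d x => d.insert x (d.getD x 0 + 1)) _ ?_,
      PySem.Dict.foldl_insert_getD_add_one_eq_counter]
  intro acc x _
  by_cases h : acc.contains x = true
  · simp [h]
  · simp only [Bool.not_eq_true] at h
    rw [if_neg (by simp [h])]
    show acc.insert x 1 = acc.insert x (acc.getD x 0 + 1)
    rw [PySem.Dict.getD_of_not_contains acc 0 h]
    norm_num

-- find? over the running set built by Set.add sees exactly the not-yet-seen elements of l.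
lemma find?_foldl_add (p : Int → Bool) (l : List Int) (s : PySem.Set Int) :
    List.find? p (l.foldl PySem.Set.add s) =
      (List.find? p s).or (List.find? (fun x => p x && !(s.contains x)) l) := by
  induction l generalizing s with
  | nil => simp
  | cons x t ih =>
    simp only [List.foldl_cons, ih, List.find?_cons]
    by_cases hm : x ∈ s
    · simp [PySem.Set.add, PySem.Set.contains, hm]
    · by_cases hp : p x = true
      · simp [PySem.Set.add, PySem.Set.contains, hm, List.find?_append, hp]
      · simp only [Bool.not_eq_true] at hp
        have hpred : (fun y => p y && !(PySem.Set.add s x).contains y)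
            = (fun y => p y && !(s.contains y)) := by
          funext y
          by_cases hy : y = x
          · subst hy; simp [hp]
          · simp [PySem.Set.add, PySem.Set.contains, hm, hy]
        simp only [PySem.Set.add] at hpred ⊢
        rw [hpred]
        simp [PySem.Set.contains, List.find?_append, hp, hm]

-- find? of a value-only predicate over set(arr) is find? over arr itself.
lemma find?_ofList (p : Int → Bool) (l : List Int) :
    List.find? p (PySem.Set.ofList l) = List.find? p l := by
  rw [PySem.Set.ofList_eq_foldl, find?_foldl_add]
  simp [PySem.Set.contains]

-- The parity-toggle loop: x is in the final set iff its parity flipped an odd number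
-- of times relative to its membership in the start set.
lemma toggle_mem (l : List Int) (s : PySem.Set Int) (hs : s.Nodup) (x : Int) :
    x ∈ l.foldl (fun s num =>
      if PySem.Set.contains s num then PySem.Set.discard s num
      else PySem.Set.add s num) s ↔ ((x ∈ s) ↔ l.count x % 2 = 0) := by
  induction l generalizing s with
  | nil => simp
  | cons y t ih =>
    simp only [List.foldl_cons]
    by_cases hy : PySem.Set.contains s y = true
    · rw [if_pos hy, ih _ (PySem.Set.nodup_discard _ _ hs), PySem.Set.mem_discard]
      rw [PySem.Set.contains_iff] at hy
      by_cases hx : x = y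
      · subst hx
        rw [List.count_cons_self]
        simp only [hy, ne_eq, not_true_eq_false, and_false, false_iff, true_iff]
        omega
      · simp [Ne.symm hx, hx]
    · rw [if_neg hy, ih _ (PySem.Set.nodup_add _ _ hs), PySem.Set.mem_add]
      have hys : y ∉ s := fun h => hy ((PySem.Set.contains_iff s y).mpr h)
      by_cases hx : x = y
      · subst hx
        rw [List.count_cons_self]
        simp only [hys, or_true, true_iff, false_iff]
        omega
      · simp [Ne.symm hx, hx]

-- Starting from the empty set: membership in the toggle set = odd occurrence count.
lemma toggle_mem_empty (l : List Int) (x : Int) :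
    x ∈ l.foldl (fun s num =>
      if PySem.Set.contains s num then PySem.Set.discard s num
      else PySem.Set.add s num) PySem.Set.empty ↔ ¬ (l.count x % 2 = 0) := by
  rw [toggle_mem l PySem.Set.empty List.nodup_nil x]
  simp [PySem.Set.empty]

-- ===== VERDICT (by name: the statement is the Claim_ definition above) =====
theorem even_occuring_element_spec : Claim_equal_even_occuring_element := by
  intro arr _
  show even_occuring_element arr = even_occuring_element_alt arr
  -- both sides equal find? of "even count" directly over arr
  have hA : even_occuring_element arr
      = arr.find? (fun num => decide (arr.count num % 2 = 0)) := by
    have hpred : (fun num => PySem.Int.band ((PySem.Dict.counter arr).getD num 0) 1 == 0)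
        = (fun num => decide (arr.count num % 2 = 0)) := by
      funext num
      rw [PySem.Dict.getD_counter, PySem.Int.band_one,
        PySem.Int.mod_eq_emod_of_pos (b := 2) (by norm_num)]
      have hc : ((List.count num arr : Int)) % 2 = ((List.count num arr % 2 : Nat) : Int) := by
        push_cast; ring
      rw [hc]
      show (_ == _) = decide (List.count num arr % 2 = 0)
      rcases Nat.mod_two_eq_zero_or_one (List.count num arr) with h | h <;> simp [h]
    simp only [even_occuring_element, dict_eq_counter, PySem.Dict.keys_counter, hpred,
      find?_ofList]
  have hB : even_occuring_element_alt arr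
      = arr.find? (fun num => decide (arr.count num % 2 = 0)) := by
    unfold even_occuring_element_alt
    show List.find? (fun num => !(PySem.Set.contains (arr.foldl (fun s num =>
        if PySem.Set.contains s num then PySem.Set.discard s num
        else PySem.Set.add s num) PySem.Set.empty) num)) arr = _
    congr 1
    funext num
    have hmem := toggle_mem_empty arr num
    by_cases h : arr.count num % 2 = 0
    · have hc : PySem.Set.contains (arr.foldl (fun s num =>
          if PySem.Set.contains s num then PySem.Set.discard s num
          else PySem.Set.add s num) PySem.Set.empty) num = false := by
        rw [← Bool.not_eq_true, PySem.Set.contains_iff _ _]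
        exact fun hm => (hmem.mp hm) h
      rw [hc]; simp [h]
    · have hc : PySem.Set.contains (arr.foldl (fun s num =>
          if PySem.Set.contains s num then PySem.Set.discard s num
          else PySem.Set.add s num) PySem.Set.empty) num = true :=
        (PySem.Set.contains_iff _ _).mpr (hmem.mpr h)
      rw [hc]; simp [h]
  rw [hA, hB]
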